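-- pv_equiv track=rewrite | github.com/cjun01/Batch_KASP | vcf_to_kasp_csv.py | normalize_genotype
-- ===== SOURCE A (Python) =====
-- def normalize_genotype(raw_gt):
--     gt = raw_gt.replace("|", "/")
--     if gt == "." or "." in gt:
--         return "missing"
--
--     alleles = gt.split("/")
--     if len(alleles) != 2:
--         return "other"
--     if any(allele not in {"0", "1"} for allele in alleles):
--         return "other"
--     if alleles == ["0", "0"]:
--         return "ref"
--     if alleles == ["1", "1"]:
--         return "alt"
--     if set(alleles) == {"0", "1"}:
--         return "het"
--     return "other"
-- ===== SOURCE B (Python) =====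
-- _GT_TABLE = {"0/0": "ref", "1/1": "alt", "0/1": "het", "1/0": "het"}
--
-- def normalize_genotype(raw_gt):
--     gt = raw_gt.replace("|", "/")
--     if "." in gt:
--         return "missing"
--     return _GT_TABLE.get(gt, "other")
-- ===== Notes on version B (the rewrite author's own statement) =====
-- stated objective: simpler
-- what changed: Replaced the split-into-alleles parsing and the length/membership/equality cascade (including the set comparison) by a single constant table lookup of the normalized genotype string, falling through to the default category for unlisted strings.
import Mathlib
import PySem

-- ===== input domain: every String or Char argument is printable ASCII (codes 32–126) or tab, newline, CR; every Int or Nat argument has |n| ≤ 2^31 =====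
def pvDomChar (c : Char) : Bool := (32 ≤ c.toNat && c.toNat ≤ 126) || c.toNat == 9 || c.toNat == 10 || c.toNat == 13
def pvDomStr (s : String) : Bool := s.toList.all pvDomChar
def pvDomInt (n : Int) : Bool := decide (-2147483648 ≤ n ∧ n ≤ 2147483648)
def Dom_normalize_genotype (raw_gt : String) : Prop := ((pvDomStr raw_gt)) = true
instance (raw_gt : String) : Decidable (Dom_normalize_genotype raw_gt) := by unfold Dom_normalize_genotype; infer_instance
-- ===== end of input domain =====

-- B replaces A's allele split and branch cascade with one constant table lookup ('simpler').

-- ===== PORT A =====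
-- literal transliteration of A: normalize '|'→'/', missing check, split on '/',
-- then the length / membership / equality / set-equality cascade (alleles as List Char)
def normalize_genotype (raw_gt : String) : String :=
  let gt := PySem.Str.replace raw_gt "|" "/"
  if gt == "." || PySem.Str.isIn "." gt then "missing"
  else
    let alleles := PySem.Chars.splitOn gt.toList ['/']
    if alleles.length ≠ 2 then "other"
    else if alleles.any (fun al => !(PySem.Set.contains (PySem.Set.ofList [['0'], ['1']]) al)) then "other"
    else if alleles = [['0'], ['0']] then "ref"
    else if alleles = [['1'], ['1']] then "alt"
    else if PySem.Set.equal (PySem.Set.ofList alleles) (PySem.Set.ofList [['0'], ['1']]) then "het"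
    else "other"

-- ===== PORT B =====
-- B-side helper: the module-level constant _GT_TABLE
def gtTable : PySem.Dict String String :=
  PySem.Dict.ofList [("0/0", "ref"), ("1/1", "alt"), ("0/1", "het"), ("1/0", "het")]

def normalize_genotype_alt (raw_gt : String) : String :=
  let gt := PySem.Str.replace raw_gt "|" "/"
  if PySem.Str.isIn "." gt then "missing"
  else PySem.Dict.getD gtTable gt "other"

-- ===== PRECONDITION & SPEC =====
def Spec_normalize_genotype (raw_gt : String) (out : String) : Prop := out = normalize_genotype_alt raw_gt
instance (raw_gt : String) (out : String) : Decidable (Spec_normalize_genotype raw_gt out) := by unfold Spec_normalize_genotype; infer_instance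

-- ===== CLAIM (what is proved, stated in full; the proofs are below) =====
def Claim_equal_normalize_genotype : Prop := ∀ (raw_gt : String), Dom_normalize_genotype raw_gt → Spec_normalize_genotype raw_gt (normalize_genotype raw_gt)

-- ===== LEMMAS AND PROOFS =====

-- reference single-character split, structurally recursive
def sSplit1 (d : Char) : List Char → List (List Char)
  | [] => [[]]
  | c :: t => if c = d then [] :: sSplit1 d t else (sSplit1 d t).modifyHead (c :: ·)

theorem sSplit1_ne_nil (d : Char) (l : List Char) : sSplit1 d l ≠ [] := by
  induction l with
  | nil => simp [sSplit1]
  | cons c t ih =>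
    simp only [sSplit1]
    split_ifs
    · simp
    · cases hs : sSplit1 d t with
      | nil => exact absurd hs ih
      | cons a b => simp

theorem splitOn_go_eq (d : Char) :
    ∀ (fuel : Nat) (l cur : List Char) (accs : List (List Char)), l.length ≤ fuel →
      PySem.Chars.splitOn.go [d] fuel l cur accs =
        accs.reverse ++ (sSplit1 d l).modifyHead (cur.reverse ++ ·) := by
  intro fuel
  induction fuel with
  | zero =>
    intro l cur accs h
    have : l = [] := List.length_eq_zero_iff.mp (Nat.le_zero.mp h)
    subst this
    simp [PySem.Chars.splitOn.go, sSplit1]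
  | succ n ih =>
    intro l cur accs h
    cases l with
    | nil => simp [PySem.Chars.splitOn.go, sSplit1]
    | cons c t =>
      simp only [PySem.Chars.splitOn.go]
      have ht : t.length ≤ n := by simpa using h
      by_cases hc : c = d
      · subst hc
        have hpre : List.isPrefixOf [c] (c :: t) = true := by simp [List.isPrefixOf]
        rw [if_pos hpre]
        simp only [List.length_singleton, List.drop_one, List.tail_cons]
        rw [ih t [] (cur.reverse :: accs) ht]
        cases hs : sSplit1 c t with
        | nil => exact absurd hs (sSplit1_ne_nil c t)
        | cons a b => simp [sSplit1, hs, List.modifyHead]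
      · have hpre : List.isPrefixOf [d] (c :: t) = false := by
          simp [List.isPrefixOf]
          intro h'; exact absurd h'.symm hc
        rw [if_neg (by simp [hpre])]
        rw [ih t (c :: cur) accs ht]
        cases hs : sSplit1 d t with
        | nil => exact absurd hs (sSplit1_ne_nil d t)
        | cons a b => simp [sSplit1, hc, hs, List.modifyHead]

theorem splitOn_eq_sSplit1 (d : Char) (cs : List Char) :
    PySem.Chars.splitOn cs [d] = sSplit1 d cs := by
  unfold PySem.Chars.splitOn
  rw [splitOn_go_eq d (cs.length + 1) cs [] [] (by omega)]
  cases hs : sSplit1 d cs with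
  | nil => exact absurd hs (sSplit1_ne_nil d cs)
  | cons a b => simp [List.modifyHead]

theorem sSplit1_singleton (d : Char) (l x : List Char) :
    sSplit1 d l = [x] → l = x := by
  induction l generalizing x with
  | nil => intro h; simp [sSplit1] at h; exact h.symm
  | cons c t ih =>
    intro h
    simp only [sSplit1] at h
    split_ifs at h with hc
    · simp at h
      exact absurd h.2 (sSplit1_ne_nil d t)
    · cases hs : sSplit1 d t with
      | nil => exact absurd hs (sSplit1_ne_nil d t)
      | cons a b =>
        rw [hs] at h
        simp only [List.modifyHead] at h
        have h1 : c :: a = x := (List.cons.injEq _ _ _ _ ▸ h).1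
        have h2 : b = [] := (List.cons.injEq _ _ _ _ ▸ h).2
        have : t = a := ih a (by rw [hs, h2])
        rw [← h1, this]

theorem sSplit1_pair (d : Char) (l a b : List Char) :
    sSplit1 d l = [a, b] → l = a ++ d :: b := by
  induction l generalizing a with
  | nil => intro h; simp [sSplit1] at h
  | cons c t ih =>
    intro h
    simp only [sSplit1] at h
    split_ifs at h with hc
    · have h1 : ([] : List Char) = a := (List.cons.injEq _ _ _ _ ▸ h).1
      have h2 : sSplit1 d t = [b] := (List.cons.injEq _ _ _ _ ▸ h).2
      have : t = b := sSplit1_singleton d t b h2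
      rw [← h1, this, hc]; rfl
    · cases hs : sSplit1 d t with
      | nil => exact absurd hs (sSplit1_ne_nil d t)
      | cons x y =>
        rw [hs] at h
        simp only [List.modifyHead] at h
        have h1 : c :: x = a := (List.cons.injEq _ _ _ _ ▸ h).1
        have h2 : y = [b] := (List.cons.injEq _ _ _ _ ▸ h).2
        have : t = x ++ d :: b := ih x (by rw [hs, h2])
        rw [← h1, this]; rfl

-- the else-branches agree on every normalized string
theorem branches_eq (gt : String) :
    (let alleles := PySem.Chars.splitOn gt.toList ['/']
     if alleles.length ≠ 2 then "other"
     else if alleles.any (fun al => !(PySem.Set.contains (PySem.Set.ofList [['0'], ['1']]) al)) then "other"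
     else if alleles = [['0'], ['0']] then "ref"
     else if alleles = [['1'], ['1']] then "alt"
     else if PySem.Set.equal (PySem.Set.ofList alleles) (PySem.Set.ofList [['0'], ['1']]) then "het"
     else "other") = PySem.Dict.getD gtTable gt "other" := by
  by_cases h0 : gt = "0/0"
  · subst h0; decide
  by_cases h1 : gt = "1/1"
  · subst h1; decide
  by_cases h2 : gt = "0/1"
  · subst h2; decide
  by_cases h3 : gt = "1/0"
  · subst h3; decide
  have hR : PySem.Dict.getD gtTable gt "other" = "other" := by
    have hg : gtTable = PySem.Dict.mk
        [("0/0", "ref"), ("1/1", "alt"), ("0/1", "het"), ("1/0", "het")] := by rfl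
    rw [hg, PySem.Dict.getD_eq_get?_getD]
    simp [Ne.symm h0, Ne.symm h1, Ne.symm h2, Ne.symm h3, PySem.Dict.get?]
  rw [hR]
  simp only [splitOn_eq_sSplit1]
  cases hs : sSplit1 '/' gt.toList with
  | nil => exact absurd hs (sSplit1_ne_nil _ _)
  | cons a rest =>
    cases rest with
    | nil => simp
    | cons b rest2 =>
      cases rest2 with
      | cons x r3 => simp
      | nil =>
        by_cases hab : (a = ['0'] ∨ a = ['1']) ∧ (b = ['0'] ∨ b = ['1'])
        · exfalso
          have hgt := sSplit1_pair '/' gt.toList a b hs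
          rcases hab with ⟨ha | ha, hb | hb⟩ <;> subst ha <;> subst hb
          · exact h0 (String.toList_injective (by rw [hgt]; rfl))
          · exact h2 (String.toList_injective (by rw [hgt]; rfl))
          · exact h3 (String.toList_injective (by rw [hgt]; rfl))
          · exact h1 (String.toList_injective (by rw [hgt]; rfl))
        · simp
          intro ha' hb'
          exact absurd ⟨by tauto, by tauto⟩ hab

-- ===== VERDICT (by name: the statement is the Claim_ definition above) =====
theorem normalize_genotype_spec : Claim_equal_normalize_genotype := by
  intro raw_gt _
  unfold Spec_normalize_genotype normalize_genotype normalize_genotype_alt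
  generalize PySem.Str.replace raw_gt "|" "/" = gt
  by_cases hin : PySem.Str.isIn "." gt = true
  · have hin' : PySem.Chars.isIn ['.'] gt.toList = true := by simpa using hin
    simp [hin']
  · have hdot : gt ≠ "." := by
      intro h; subst h; exact hin (by decide)
    have hin' : ¬ PySem.Chars.isIn ['.'] gt.toList = true := by simpa using hin
    have hB : PySem.Str.isIn "." gt = false := Bool.not_eq_true _ |>.mp hin
    simp only [hB, Bool.or_false, beq_iff_eq, Bool.false_eq_true, if_false, if_neg hdot]
    exact branches_eq gt
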